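-- pv_equiv track=rewrite | github.com/sammo11r/AutomataChecker | DFA.py | checkDFA
-- ===== SOURCE A (Python) =====
-- def checkDFA(dfa, W):
-- 	# Extract the DFA
-- 	D = dfa[0]
-- 	q0 = dfa[1]
-- 	F = dfa[2]
--
-- 	# Set the counter for the amount of reached states
-- 	reached = 0
--
-- 	# For each word in the set of words
-- 	for w in W:
-- 		if w == "":
-- 			reached +=1
-- 		else:
-- 			# Check if the word ends in a final state
-- 			reached = checkWord(D, q0, F, reached, w)
--
-- 	# If the amount of reached states is equal to |W|, and is not equal to 0,
-- 	if reached == len(W) and reached != 0: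
-- 		# The DFA is valid for the words in W
-- 		return True
-- 	else:
-- 		# Else, the DFA rejects at least 1 word in W
-- 		return False
--
-- def checkWord(D, q0, F, reached, w):
-- 	# Set the current state to the starting state
-- 	currentState = q0
--
-- 	# While w is not the empty string
-- 	while ((not w) == False):
--         # Check for a valid transition, and set currentState
-- 		temp = checkTransition(D, w, currentState)
--
-- 		# Check the state of the transition
-- 		if (temp == False):
-- 			return reached
--
-- 		currentState = temp[0]
-- 		w = temp[1]
--
-- 		# If w is the empty string
-- 		if not w:
-- 			# Check for each state in the set of final states,
-- 			for f in F:
-- 				# if the current state is a final state,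
-- 				if currentState == f:
-- 					# increase the counter
-- 					reached += 1
-- 					break
-- 	return reached
--
-- def checkTransition(D, w, currentState):
-- 	# For all transitions in Delta
-- 	for t in D:
-- 		# If we are in said transitions currentstate,
-- 		# and the transition label is the specified word
-- 		if (t[0] == currentState and t[2] == w[0]):
-- 			# Set the current state and update w
-- 			currentState = t[1]
-- 			w = w[1:]
--
-- 			return currentState, w
--
-- 	# If all transitions have been checked, return false
-- 	return False
-- ===== SOURCE B (Python) =====
-- def checkDFA(dfa, W):
--     D, q0, F = dfa
--
--     def accepts(w):
--         state = q0
--         for c in w: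
--             for t in D:
--                 if t[0] == state and t[2] == c:
--                     state = t[1]
--                     break
--             else:
--                 return False
--         # A counts the empty word as reached unconditionally
--         return w == "" or state in F
--
--     return bool(W) and all(accepts(w) for w in W)
-- ===== Notes on version B (the rewrite author's own statement) =====
-- stated objective: simpler
-- what changed: Replaces the reached-counter threaded through two helpers by a direct per-word accepts() simulation that iterates over characters (no w[1:] string copies), combined as bool(W) and all(...).
import Mathlib
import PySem

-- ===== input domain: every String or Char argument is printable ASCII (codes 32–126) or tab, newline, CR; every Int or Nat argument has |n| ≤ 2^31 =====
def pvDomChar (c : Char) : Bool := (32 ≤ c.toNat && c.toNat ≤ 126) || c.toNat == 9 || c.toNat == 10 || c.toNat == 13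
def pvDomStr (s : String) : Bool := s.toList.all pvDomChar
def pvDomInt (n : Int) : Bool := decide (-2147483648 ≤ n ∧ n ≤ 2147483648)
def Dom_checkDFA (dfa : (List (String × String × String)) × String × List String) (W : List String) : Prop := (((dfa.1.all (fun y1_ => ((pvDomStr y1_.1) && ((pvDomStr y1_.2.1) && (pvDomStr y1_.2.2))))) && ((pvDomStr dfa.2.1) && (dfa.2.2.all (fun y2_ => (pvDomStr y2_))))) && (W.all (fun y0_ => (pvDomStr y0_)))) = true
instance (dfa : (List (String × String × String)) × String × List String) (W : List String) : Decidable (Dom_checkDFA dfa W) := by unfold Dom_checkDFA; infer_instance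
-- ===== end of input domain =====

-- B merges the reached-counter and its two helpers into a single per-word accepts simulation; same results.

-- ===== PORT A =====
-- checkTransition(D, w, currentState): scan D for the first transition out of
-- currentState labelled w[0]; returns (newState, w[1:]) or False (here: none).
def checkTransitionA (D : List (String × String × String)) (c : Char)
    (rest : List Char) (currentState : String) : Option (String × List Char) :=
  match D with
  | [] => none
  | t :: ts =>
    if t.1 == currentState && t.2.2 == String.mk [c] then some (t.2.1, rest)
    else checkTransitionA ts c rest currentState

-- the returned word is always the tail (Python returns w[1:]); used for termination
theorem checkTransitionA_snd (D : List (String × String × String)) (c : Char)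
    (rest : List Char) (q : String) (s : String) (w' : List Char)
    (h : checkTransitionA D c rest q = some (s, w')) : w' = rest := by
  induction D with
  | nil => simp [checkTransitionA] at h
  | cons t ts ih =>
    simp only [checkTransitionA] at h
    split at h
    · simp at h; exact h.2.symm
    · exact ih h

-- the for f in F: if currentState == f: reached += 1; break  loop of checkWord
def finalBumpA (F : List String) (currentState : String) (reached : Int) : Int :=
  match F with
  | [] => reached
  | f :: fs => if currentState == f then reached + 1 else finalBumpA fs currentState reached

-- checkWord(D, q0, F, reached, w): while-loop over w, bumping reached when the
-- word is fully consumed in a final state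
def checkWordA (D : List (String × String × String)) (q0 : String) (F : List String)
    (reached : Int) (w : List Char) : Int :=
  match w with
  | [] => reached
  | c :: rest =>
    match h : checkTransitionA D c rest q0 with
    | none => reached
    | some (st, w') =>
      let reached' := if w'.isEmpty then finalBumpA F st reached else reached
      checkWordA D st F reached' w'
  termination_by w.length
  decreasing_by
    have := checkTransitionA_snd D c rest q0 st w' h
    subst this; simp

def checkDFA (dfa : (List (String × String × String)) × String × List String)
    (W : List String) : Bool :=
  let D := dfa.1
  let q0 := dfa.2.1
  let F := dfa.2.2
  let reached := W.foldl
    (fun reached w => if w == "" then reached + 1 else checkWordA D q0 F reached w.toList)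
    (0 : Int)
  if reached == (W.length : Int) && !(reached == 0) then true else false

-- ===== PORT B =====
-- first transition out of state labelled c (inner for/else of accepts)
def stepB (D : List (String × String × String)) (state : String) (c : Char) : Option String :=
  (D.find? (fun t => t.1 == state && t.2.2 == String.mk [c])).map (fun t => t.2.1)

-- the for-c-in-w loop of accepts: run the DFA, none = stuck (return False)
def runB (D : List (String × String × String)) (state : String) : List Char → Option String
  | [] => some state
  | c :: cs =>
    match stepB D state c with
    | none => none
    | some s => runB D s cs

def acceptsB (D : List (String × String × String)) (q0 : String) (F : List String)
    (w : String) : Bool :=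
  match runB D q0 w.toList with
  | none => false
  | some s => w == "" || F.contains s

def checkDFA_alt (dfa : (List (String × String × String)) × String × List String)
    (W : List String) : Bool :=
  !W.isEmpty && W.all (acceptsB dfa.1 dfa.2.1 dfa.2.2)

-- ===== PRECONDITION & SPEC =====
def Spec_checkDFA (dfa : (List (String × String × String)) × String × List String) (W : List String) (out : Bool) : Prop := out = checkDFA_alt dfa W
instance (dfa : (List (String × String × String)) × String × List String) (W : List String) (out : Bool) : Decidable (Spec_checkDFA dfa W out) := by unfold Spec_checkDFA; infer_instance

-- ===== CLAIM (what is proved, stated in full; the proofs are below) =====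
def Claim_equal_checkDFA : Prop := ∀ (dfa : (List (String × String × String)) × String × List String) (W : List String), Dom_checkDFA dfa W → Spec_checkDFA dfa W (checkDFA dfa W)

-- ===== LEMMAS AND PROOFS =====

theorem checkTransitionA_eq_stepB (D : List (String × String × String)) (c : Char)
    (rest : List Char) (q : String) :
    checkTransitionA D c rest q = (stepB D q c).map (fun s => (s, rest)) := by
  induction D with
  | nil => simp [checkTransitionA, stepB]
  | cons t ts ih =>
    simp only [checkTransitionA, stepB, List.find?]
    by_cases h : (t.1 == q && t.2.2 == String.mk [c]) = true
    · simp [h]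
    · simp only [h]; simpa [stepB] using ih

theorem finalBumpA_eq (F : List String) (st : String) (r : Int) :
    finalBumpA F st r = if F.contains st then r + 1 else r := by
  induction F with
  | nil => simp [finalBumpA]
  | cons f fs ih =>
    simp only [finalBumpA, List.contains_cons]
    by_cases h : st = f
    · simp [h]
    · simp [h, ih]

-- main loop correspondence: on a nonempty word, checkWord bumps reached iff the run
-- ends in a final state
theorem checkWordA_eq_runB (D : List (String × String × String)) (F : List String) :
    ∀ (w : List Char) (q : String) (r : Int), w ≠ [] →
    checkWordA D q F r w =
      (match runB D q w with
       | none => r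
       | some s => if F.contains s then r + 1 else r) := by
  intro w
  induction w with
  | nil => intro q r h; exact absurd rfl h
  | cons c rest ih =>
    intro q r _
    rw [checkWordA]
    rw [checkTransitionA_eq_stepB]
    cases hs : stepB D q c with
    | none => simp [runB, hs]
    | some s =>
      simp only [Option.map_some]
      by_cases hrest : rest = []
      · subst hrest; simp [runB, hs, checkWordA, finalBumpA_eq]
      · have hie : rest.isEmpty = false := by simpa using hrest
        simp only [hie, Bool.false_eq_true, if_neg, not_false_eq_true]
        rw [ih s r hrest]
        simp [runB, hs]

theorem acceptsB_toList (D : List (String × String × String)) (q0 : String)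
    (F : List String) (w : String) :
    acceptsB D q0 F w =
      (match runB D q0 w.toList with
       | none => false
       | some s => w == "" || F.contains s) := rfl

-- reached after the fold = number of accepted words
theorem foldA_count (D : List (String × String × String)) (q0 : String) (F : List String) :
    ∀ (W : List String) (r : Int),
    W.foldl (fun reached w => if w == "" then reached + 1
                              else checkWordA D q0 F reached w.toList) r
      = r + (W.countP (acceptsB D q0 F) : Int) := by
  intro W
  induction W with
  | nil => intro r; simp
  | cons w ws ih =>
    intro r
    simp only [List.foldl_cons, List.countP_cons]
    rw [ih]
    have hstep : (if w == "" then r + 1 else checkWordA D q0 F r w.toList)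
        = r + (if acceptsB D q0 F w then 1 else 0) := by
      by_cases hw : (w == "") = true
      · have : w.toList = [] := by
          have : w = "" := by simpa using hw
          simp [this]
        simp [hw, acceptsB, this, runB]
      · have hne : w.toList ≠ [] := by
          intro hnil
          exact hw (by simpa using String.toList_inj.mp (by simpa using hnil))
        rw [if_neg (by simpa using hw)]
        rw [checkWordA_eq_runB D F w.toList q0 r hne]
        rw [acceptsB_toList]
        have hwf : (w == "") = false := by simpa using hw
        cases hr : runB D q0 w.toList with
        | none => simp
        | some s =>
          simp only [hwf, Bool.false_or]
          by_cases hc : s ∈ F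
          · simp [hc]
          · simp [hc]
    rw [hstep]
    by_cases ha : acceptsB D q0 F w = true <;> simp [ha] <;> ring

-- ===== VERDICT (by name: the statement is the Claim_ definition above) =====
theorem checkDFA_spec : Claim_equal_checkDFA := by
  intro dfa W _
  simp only [Spec_checkDFA, checkDFA, checkDFA_alt]
  rw [foldA_count]
  simp only [zero_add]
  set p := acceptsB dfa.1 dfa.2.1 dfa.2.2 with hp
  by_cases hW : W = []
  · subst hW; simp
  · have hne : W.isEmpty = false := by simpa using hW
    simp only [hne, Bool.not_false, Bool.true_and]
    by_cases hall : W.all p = true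
    · have hcnt : W.countP p = W.length :=
        List.countP_eq_length.mpr (List.all_eq_true.mp hall)
      have hpos : 0 < W.length := List.length_pos_iff.mpr hW
      have hz : ((W.length : Int) == 0) = false := by
        simpa using (by omega : ¬ ((W.length : Int) = 0))
      simp [hall, hcnt, hz]
    · have hcne : W.countP p ≠ W.length := fun h =>
        hall (List.all_eq_true.mpr (List.countP_eq_length.mp h))
      have hb : ((W.countP p : Int) == (W.length : Int)) = false := by
        rw [beq_eq_false_iff_ne]
        exact fun h => hcne (by exact_mod_cast h)
      have hf : W.all p = false := by
        cases h : W.all p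
        · rfl
        · exact absurd h hall
      simp [hb, hf]
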